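-- pv_equiv track=rewrite | github.com/weekman90/Numerology_Kivy_App | summkod.py | summkod
-- ===== SOURCE A (Python) =====
-- def summkod(x,y,z):
--     x=x+y+z
--     summ=0
--
--     simbols = {1: ['а', 'и', 'с', 'ъ', 'a', 'j', 's'],
--                2: ['б', 'й', 'т', 'ы', 'b', 'k', 't'],
--                3: ['в', 'к', 'у', 'ь', 'c', 'l', 'u'],
--                4: ['г', 'л', 'ф', 'э', 'd', 'm', 'v'],
--                5: ['д', 'м', 'х', 'ю', 'e', 'n', 'w'],
--                6: ['е', 'н', 'ц', 'я', 'f', 'o', 'x'],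
--                7: ['ё', 'о', 'ч', 'g', 'p', 'y'],
--                8: ['ж', 'п', 'ш', 'h', 'q', 'z'],
--                9: ['з', 'р', 'щ', 'i', 'r']}
--     for i in simbols:
--         for j in simbols.get(i):
--             for n in x:
--                 if j == n:
--                     summ+=i
--         a=str(summ)
--         b=0
--         while len (a)>=2:
--             for i in a:
--                 b+=int(i)
--             a=str(b)
--             b=0
--     a=int(a)
--     return (a)
-- ===== SOURCE B (Python) =====
-- _SIMBOLS = {1: ['а', 'и', 'с', 'ъ', 'a', 'j', 's'],
--             2: ['б', 'й', 'т', 'ы', 'b', 'k', 't'],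
--             3: ['в', 'к', 'у', 'ь', 'c', 'l', 'u'],
--             4: ['г', 'л', 'ф', 'э', 'd', 'm', 'v'],
--             5: ['д', 'м', 'х', 'ю', 'e', 'n', 'w'],
--             6: ['е', 'н', 'ц', 'я', 'f', 'o', 'x'],
--             7: ['ё', 'о', 'ч', 'g', 'p', 'y'],
--             8: ['ж', 'п', 'ш', 'h', 'q', 'z'],
--             9: ['з', 'р', 'щ', 'i', 'r']}
--
-- _VALUES = {c: v for v, cs in _SIMBOLS.items() for c in cs}
--
-- def summkod(x, y, z):
--     s = 0
--     for c in x + y + z: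
--         s += _VALUES.get(c, 0)
--     return 0 if s == 0 else 1 + (s - 1) % 9
-- ===== Notes on version B (the rewrite author's own statement) =====
-- stated objective: faster
-- what changed: replace the 63 passes over the string (one per letter of the table) and the per-key repeated digit-sum reductions by a single pass with a precomputed char->value dict and a closed-form digital root 1+(s-1)%9
import Mathlib
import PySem

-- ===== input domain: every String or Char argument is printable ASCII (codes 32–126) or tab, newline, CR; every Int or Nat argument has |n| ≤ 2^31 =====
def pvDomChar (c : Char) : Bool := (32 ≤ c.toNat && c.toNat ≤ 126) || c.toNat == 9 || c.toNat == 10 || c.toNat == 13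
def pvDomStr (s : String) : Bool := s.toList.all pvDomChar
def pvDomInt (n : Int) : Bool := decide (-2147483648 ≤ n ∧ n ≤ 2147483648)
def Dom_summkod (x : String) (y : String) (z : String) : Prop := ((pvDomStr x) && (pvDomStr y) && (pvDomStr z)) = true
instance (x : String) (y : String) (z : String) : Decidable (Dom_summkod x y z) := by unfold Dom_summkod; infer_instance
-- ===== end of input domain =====

-- B replaces A's 63 passes over the string (one per table letter) and per-key digit-sum
-- reductions by one precomputed char→value dict, a single pass, and the digital-root formula.

-- ===== PORT A =====
-- the dict literal 'simbols' (insertion order 1..9)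
def pvSimbolsA : PySem.Dict Int (List Char) := PySem.Dict.mk
  [(1, ['а', 'и', 'с', 'ъ', 'a', 'j', 's']),
   (2, ['б', 'й', 'т', 'ы', 'b', 'k', 't']),
   (3, ['в', 'к', 'у', 'ь', 'c', 'l', 'u']),
   (4, ['г', 'л', 'ф', 'э', 'd', 'm', 'v']),
   (5, ['д', 'м', 'х', 'ю', 'e', 'n', 'w']),
   (6, ['е', 'н', 'ц', 'я', 'f', 'o', 'x']),
   (7, ['ё', 'о', 'ч', 'g', 'p', 'y']),
   (8, ['ж', 'п', 'ш', 'h', 'q', 'z']),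
   (9, ['з', 'р', 'щ', 'i', 'r'])]

-- 'for i in a: b += int(i)':  int(i) ported as (i.toNat - 48), exact for decimal-digit
-- characters — the only characters of a = str(<nonnegative int>).
def pvDigitAdd (a : List Char) : Int := a.foldl (fun b i => b + ((i.toNat : Int) - 48)) 0

-- termination facts for the 'while len(a) >= 2' loop (proved before pvReduce, which cites pvReduce_dec)
lemma pvToDigitsCore_eq (f : Nat) : ∀ (n : Nat) (l : List Char), 0 < n → n < f →
    Nat.toDigitsCore 10 f n l = ((Nat.digits 10 n).map Nat.digitChar).reverse ++ l := by
  induction f with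
  | zero => intro n l h0 hf; omega
  | succ f ih =>
    intro n l h0 hf
    rw [Nat.toDigitsCore]
    by_cases h10 : n / 10 = 0
    · simp only [h10, if_true]
      rw [Nat.digits_def' (by norm_num : (1:Nat) < 10) h0, h10]
      simp
    · simp only [h10, if_false]
      rw [ih (n / 10) _ (Nat.pos_of_ne_zero h10)
        (by have := Nat.div_lt_self h0 (by norm_num : (1:Nat) < 10); omega)]
      rw [Nat.digits_def' (by norm_num : (1:Nat) < 10) h0]
      simp

lemma pvToChars_pos (n : Nat) (h : 0 < n) :
    PySem.Int.toChars (n : Int) = ((Nat.digits 10 n).map Nat.digitChar).reverse := by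
  simp only [PySem.Int.toChars]
  rw [if_neg (by omega)]
  show Nat.toDigits 10 (Int.toNat n) = _
  rw [Int.toNat_natCast, Nat.toDigits, pvToDigitsCore_eq (n+1) n [] h (by omega)]
  simp

lemma pvLen_ge2_iff (n : Nat) : 2 ≤ (PySem.Int.toChars (n : Int)).length ↔ 10 ≤ n := by
  rcases Nat.eq_zero_or_pos n with h | h
  · subst h; decide
  · rw [pvToChars_pos n h]
    simp only [List.length_reverse, List.length_map]
    rw [Nat.length_digits 10 n (by norm_num) (by omega)]
    have hlog := Nat.log_eq_zero_iff (b := 10) (n := n)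
    have hlog2 : 10 ≤ n → 0 < Nat.log 10 n := fun hn => Nat.log_pos (by norm_num) hn
    omega

lemma pvDigitAdd_toChars (n : Nat) :
    pvDigitAdd (PySem.Int.toChars (n : Int)) = ((Nat.digits 10 n).sum : Int) := by
  rcases Nat.eq_zero_or_pos n with h | h
  · subst h; decide
  · rw [pvToChars_pos n h]
    unfold pvDigitAdd
    rw [PySem.List.foldl_add (g := fun i : Char => ((i.toNat : Int) - 48))]
    rw [List.map_reverse, List.sum_reverse, List.map_map, zero_add]
    have : ∀ d ∈ Nat.digits 10 n,
        ((fun i : Char => ((i.toNat : Int) - 48)) ∘ Nat.digitChar) d = (d : Int) := by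
      intro d hd
      have : d < 10 := Nat.digits_lt_base (by norm_num) hd
      interval_cases d <;> decide
    rw [List.map_congr_left this]
    exact (Nat.cast_list_sum _).symm

lemma pvSumDigits_le (n : Nat) : (Nat.digits 10 n).sum ≤ n := Nat.digit_sum_le 10 n

lemma pvReduce_dec (n : Nat) (h : 2 ≤ (PySem.Int.toChars (n : Int)).length) :
    (pvDigitAdd (PySem.Int.toChars (n : Int))).toNat < n := by
  have h10 : 10 ≤ n := (pvLen_ge2_iff n).mp h
  rw [pvDigitAdd_toChars, Int.toNat_natCast]
  rw [Nat.digits_def' (by norm_num : (1:Nat) < 10) (by omega)]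
  have := pvSumDigits_le (n / 10)
  simp only [List.sum_cons]
  omega

-- 'a = str(summ); while len(a) >= 2: b = sum of int(i) for i in a; a = str(b)': the loop
-- state a is always str of a nonnegative integer; it is carried as that integer n, with
-- a = str(n) recomputed, so that the loop terminates structurally.
def pvReduce (n : Nat) : List Char :=
  if h : 2 ≤ (PySem.Int.toChars (n : Int)).length then
    pvReduce (pvDigitAdd (PySem.Int.toChars (n : Int))).toNat
  else PySem.Int.toChars (n : Int)
termination_by n
decreasing_by exact pvReduce_dec n h

-- 'for n in x: if j == n: summ += i'
def pvInnerA (s : List Char) (i : Int) (summ : Int) (j : Char) : Int :=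
  s.foldl (fun summ n => if j == n then summ + i else summ) summ

-- one iteration of 'for i in simbols' (state: summ and the string a; a of earlier
-- iterations is overwritten, the initial [] is a placeholder for the still-unbound a)
def pvStepA (s : List Char) (st : Int × List Char) (kv : Int × List Char) : Int × List Char :=
  let summ := kv.2.foldl (pvInnerA s kv.1) st.1
  (summ, pvReduce summ.toNat)

def summkod (x : String) (y : String) (z : String) : Int :=
  let s := x.toList ++ y.toList ++ z.toList   -- x = x + y + z
  let fin := pvSimbolsA.items.foldl (pvStepA s) (0, [])
  (PySem.Int.ofChars? fin.2).getD 0           -- a = int(a); a is always a digit string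

-- ===== PORT B =====
def pvSimbolsB : PySem.Dict Int (List Char) := PySem.Dict.mk
  [(1, ['а', 'и', 'с', 'ъ', 'a', 'j', 's']),
   (2, ['б', 'й', 'т', 'ы', 'b', 'k', 't']),
   (3, ['в', 'к', 'у', 'ь', 'c', 'l', 'u']),
   (4, ['г', 'л', 'ф', 'э', 'd', 'm', 'v']),
   (5, ['д', 'м', 'х', 'ю', 'e', 'n', 'w']),
   (6, ['е', 'н', 'ц', 'я', 'f', 'o', 'x']),
   (7, ['ё', 'о', 'ч', 'g', 'p', 'y']),
   (8, ['ж', 'п', 'ш', 'h', 'q', 'z']),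
   (9, ['з', 'р', 'щ', 'i', 'r'])]

-- _VALUES = {c: v for v, cs in _SIMBOLS.items() for c in cs}
def pvValuesB : PySem.Dict Char Int :=
  PySem.Dict.ofList (pvSimbolsB.items.flatMap (fun kv => kv.2.map (fun c => (c, kv.1))))

def summkod_alt (x : String) (y : String) (z : String) : Int :=
  let s := (x.toList ++ y.toList ++ z.toList).foldl (fun s c => s + pvValuesB.getD c 0) 0
  if s = 0 then 0 else 1 + PySem.Int.mod (s - 1) 9

-- ===== PRECONDITION & SPEC =====
def Spec_summkod (x : String) (y : String) (z : String) (out : Int) : Prop := out = summkod_alt x y z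
instance (x : String) (y : String) (z : String) (out : Int) : Decidable (Spec_summkod x y z out) := by unfold Spec_summkod; infer_instance

-- ===== CLAIM (what is proved, stated in full; the proofs are below) =====
def Claim_equal_summkod : Prop := ∀ (x : String) (y : String) (z : String), Dom_summkod x y z → Spec_summkod x y z (summkod x y z)

-- ===== LEMMAS AND PROOFS =====

-- the flat (letter, value) pair list both sides are about
def pvFlat : List (Char × Int) := pvSimbolsA.items.flatMap (fun kv => kv.2.map (fun j => (j, kv.1)))

-- per-character value, B's lookup
def pvVal (c : Char) : Int := pvValuesB.getD c 0

-- digital root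
def pvRoot (n : Nat) : Nat := if n = 0 then 0 else (n - 1) % 9 + 1

lemma pvSumDigits_pos (n : Nat) (h : 0 < n) : 0 < (Nat.digits 10 n).sum := by
  induction n using Nat.strong_induction_on with
  | _ n ih =>
    rw [Nat.digits_def' (by norm_num : (1:Nat) < 10) h, List.sum_cons]
    by_cases h10 : n % 10 = 0
    · have hdiv : 0 < n / 10 := by omega
      have := ih (n / 10) (Nat.div_lt_self h (by norm_num)) hdiv
      omega
    · omega

lemma pvReduce_eq_root (n : Nat) : pvReduce n = PySem.Int.toChars (pvRoot n : Int) := by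
  induction n using Nat.strong_induction_on with
  | _ n ih =>
    rw [pvReduce]
    by_cases h : 2 ≤ (PySem.Int.toChars (n : Int)).length
    · rw [dif_pos h]
      have h10 : 10 ≤ n := (pvLen_ge2_iff n).mp h
      rw [pvDigitAdd_toChars, Int.toNat_natCast]
      rw [ih _ (by have := pvReduce_dec n h
                   rwa [pvDigitAdd_toChars, Int.toNat_natCast] at this)]
      have hmod : n % 9 = (Nat.digits 10 n).sum % 9 := Nat.modEq_digits_sum 9 10 (by norm_num) n
      have hpos : 0 < (Nat.digits 10 n).sum := pvSumDigits_pos n (by omega)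
      have : pvRoot (Nat.digits 10 n).sum = pvRoot n := by
        unfold pvRoot; split_ifs <;> omega
      rw [this]
    · rw [dif_neg h]
      have : pvRoot n = n := by
        have := (pvLen_ge2_iff n).not.mp h
        unfold pvRoot; split_ifs <;> omega
      rw [this]

lemma pvOfChars_small (r : Nat) (h : r < 10) :
    (PySem.Int.ofChars? (PySem.Int.toChars (r : Int))).getD 0 = (r : Int) := by
  interval_cases r <;> decide

lemma pvFinal (m : Nat) :
    (PySem.Int.ofChars? (pvReduce m)).getD 0
      = if (m : Int) = 0 then 0 else 1 + PySem.Int.mod ((m : Int) - 1) 9 := by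
  rw [pvReduce_eq_root, pvOfChars_small _ (by unfold pvRoot; split_ifs <;> omega)]
  rw [PySem.Int.mod_eq_emod_of_pos (by norm_num)]
  unfold pvRoot
  split_ifs with h1 h2 <;> omega

lemma pvInnerA_eq (s : List Char) (i : Int) (acc : Int) (j : Char) :
    pvInnerA s i acc j = acc + i * (s.count j : Int) := by
  induction s generalizing acc with
  | nil => simp [pvInnerA]
  | cons c t ih =>
    simp only [pvInnerA, List.foldl_cons] at *
    rw [ih, List.count_cons]
    by_cases h : j = c
    · have h1 : (j == c) = true := by simpa using h
      have h2 : (c == j) = true := by simpa using h.symm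
      simp only [h1, h2, if_true]
      push_cast
      ring
    · have h1 : (j == c) = false := by simpa using h
      have h2 : (c == j) = false := by simpa using Ne.symm h
      simp only [h1, h2, if_false, Bool.false_eq_true]
      push_cast
      ring

lemma pvFoldl_fst (s : List Char) (L : List (Int × List Char)) (st : Int × List Char) :
    (L.foldl (pvStepA s) st).1
      = st.1 + ((L.flatMap (fun kv => kv.2.map (fun j => (j, kv.1)))).map
          (fun p => p.2 * (s.count p.1 : Int))).sum := by
  induction L generalizing st with
  | nil => simp
  | cons kv rest ih =>
    rw [List.foldl_cons, ih]
    have hstep : (pvStepA s st kv).1 = st.1 + (kv.2.map (fun j => kv.1 * (s.count j : Int))).sum := by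
      show kv.2.foldl (pvInnerA s kv.1) st.1 = _
      have : pvInnerA s kv.1 = fun acc j => acc + kv.1 * (s.count j : Int) :=
        funext fun acc => funext fun j => pvInnerA_eq s kv.1 acc j
      rw [this, PySem.List.foldl_add (g := fun j : Char => kv.1 * (s.count j : Int))]
    rw [hstep, List.flatMap_cons, List.map_append, List.sum_append, List.map_map]
    have : ((fun p : Char × Int => p.2 * (s.count p.1 : Int)) ∘ fun j => (j, kv.1))
         = fun j => kv.1 * (s.count j : Int) := by
      funext j; simp
    rw [this]
    ring

lemma pvFoldl_snd (s : List Char) (L : List (Int × List Char)) (st : Int × List Char)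
    (h : L ≠ []) : (L.foldl (pvStepA s) st).2 = pvReduce ((L.foldl (pvStepA s) st).1).toNat := by
  induction L generalizing st with
  | nil => exact absurd rfl h
  | cons kv rest ih =>
    rw [List.foldl_cons]
    rcases rest with _ | ⟨kv2, rest2⟩
    · simp [pvStepA]
    · exact ih _ (by simp)

lemma pvSum_zero_of_not_mem (ps : List (Char × Int)) (c : Char) (h : c ∉ ps.map Prod.fst) :
    ((ps.map (fun p => if p.1 == c then p.2 else 0)).sum : Int) = 0 := by
  induction ps with
  | nil => simp
  | cons p t ih =>
    simp only [List.map_cons, List.mem_cons, not_or] at h ⊢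
    rw [List.sum_cons, if_neg (by simpa using fun e => h.1 e.symm), ih h.2]
    ring

lemma pvSum_of_mem (ps : List (Char × Int)) (c : Char) (v : Int)
    (hnd : (ps.map Prod.fst).Nodup) (hm : (c, v) ∈ ps) :
    ((ps.map (fun p => if p.1 == c then p.2 else 0)).sum : Int) = v := by
  induction ps with
  | nil => simp at hm
  | cons p t ih =>
    simp only [List.map_cons, List.nodup_cons] at hnd
    rcases List.mem_cons.mp hm with h | h
    · subst h
      rw [List.map_cons, List.sum_cons, if_pos (by simp),
        pvSum_zero_of_not_mem t c hnd.1, add_zero]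
    · have hne : p.1 ≠ c := by
        intro e
        exact hnd.1 (by rw [e]; exact List.mem_map_of_mem h)
      rw [List.map_cons, List.sum_cons, if_neg (by simpa using hne), ih hnd.2 h, zero_add]

set_option maxRecDepth 4096 in
lemma pvValuesB_items : pvValuesB.items = pvFlat := by decide

set_option maxRecDepth 4096 in
lemma pvFlat_keys_nodup : (pvFlat.map Prod.fst).Nodup := by decide

lemma pvValuesB_keys : pvValuesB.keys = pvFlat.map Prod.fst := by
  show pvValuesB.items.map Prod.fst = _
  rw [pvValuesB_items]

lemma pvVal_eq_sum (c : Char) :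
    pvVal c = (pvFlat.map (fun p => if p.1 == c then p.2 else 0)).sum := by
  unfold pvVal
  by_cases h : c ∈ pvFlat.map Prod.fst
  · rcases List.mem_map.mp h with ⟨p, hp, hpc⟩
    have hm : (c, p.2) ∈ pvValuesB.items := by
      rw [pvValuesB_items]; rwa [← hpc]
    rw [PySem.Dict.getD_of_mem_items pvValuesB hm (by rw [pvValuesB_keys]; exact pvFlat_keys_nodup) 0]
    exact (pvSum_of_mem pvFlat c p.2 pvFlat_keys_nodup (by rw [← pvValuesB_items]; exact hm)).symm
  · rw [PySem.Dict.getD_of_get?_eq_none pvValuesB 0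
      ((PySem.Dict.get?_eq_none_iff_not_mem_keys pvValuesB c).mpr (by rw [pvValuesB_keys]; exact h))]
    exact (pvSum_zero_of_not_mem pvFlat c h).symm

lemma pvCharSum (s : List Char) :
    (pvFlat.map (fun p => p.2 * (s.count p.1 : Int))).sum = (s.map pvVal).sum := by
  induction s with
  | nil => simp
  | cons c t ih =>
    have : (pvFlat.map (fun p => p.2 * ((c :: t).count p.1 : Int)))
         = pvFlat.map (fun p => p.2 * (t.count p.1 : Int) + (if p.1 == c then p.2 else 0)) := by
      apply List.map_congr_left
      intro p _
      rw [List.count_cons]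
      by_cases h : p.1 = c
      · have h1 : (p.1 == c) = true := by simpa using h
        have h2 : (c == p.1) = true := by simpa using h.symm
        simp only [h1, h2, if_true]
        push_cast; ring
      · have h1 : (p.1 == c) = false := by simpa using h
        have h2 : (c == p.1) = false := by simpa using Ne.symm h
        simp only [h1, h2, if_false, Bool.false_eq_true]
        push_cast; ring
    rw [this, PySem.List.sum_map_add_int, ih, ← pvVal_eq_sum, List.map_cons, List.sum_cons]
    ring

set_option maxRecDepth 4096 in
lemma pvFlat_vals_nonneg : ∀ p ∈ pvFlat, 0 ≤ p.2 := by decide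

lemma pvVal_nonneg (c : Char) : 0 ≤ pvVal c := by
  rw [pvVal_eq_sum]
  apply List.sum_nonneg
  intro x hx
  rcases List.mem_map.mp hx with ⟨p, hp, rfl⟩
  split_ifs
  · exact pvFlat_vals_nonneg p hp
  · exact le_refl 0

-- ===== VERDICT (by name: the statement is the Claim_ definition above) =====
theorem summkod_spec : Claim_equal_summkod := by
  intro x y z _
  show summkod x y z = summkod_alt x y z
  simp only [summkod, summkod_alt]
  have hflat : pvSimbolsA.items.flatMap (fun kv => kv.2.map (fun j => (j, kv.1))) = pvFlat := rfl
  have hne : pvSimbolsA.items ≠ [] := by simp [pvSimbolsA]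
  set s := x.toList ++ y.toList ++ z.toList with hs
  set S := (s.map pvVal).sum with hS
  have hSnn : 0 ≤ S := by
    apply List.sum_nonneg
    intro v hv
    rcases List.mem_map.mp hv with ⟨c, _, rfl⟩
    exact pvVal_nonneg c
  have hfst : (pvSimbolsA.items.foldl (pvStepA s) (0, [])).1 = S := by
    rw [pvFoldl_fst, hflat, pvCharSum, zero_add]
  rw [pvFoldl_snd s pvSimbolsA.items (0, []) hne, hfst, pvFinal,
    Int.toNat_of_nonneg hSnn,
    PySem.List.foldl_add (g := fun c : Char => pvValuesB.getD c 0)]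
  have hB : (s.map (fun c => pvValuesB.getD c 0)).sum = S := rfl
  rw [hB, zero_add]
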